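-- pv_equiv track=rewrite | github.com/vibecodeisthefuture/sibyl.ai | sibyl/pipelines/science_pipeline.py | _find_matching_markets
-- ===== SOURCE A (Python) =====
-- from typing import List, Dict, Optional
--
-- def _find_matching_markets(
--
--     markets: List[Dict],
--     keywords: List[str]
-- ) -> List[Dict]:
--     """
--     Find markets matching given keywords.
--
--     Args:
--         markets: List of market dictionaries to search.
--         keywords: List of keywords to match against market titles.
--
--     Returns:
--         List of matching market dictionaries.
--     """
--     matching = []
--     keywords_lower = [k.lower() for k in keywords]
--
--     for market in markets:
--         title_lower = market.get("title", "").lower()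
--         if any(keyword in title_lower for keyword in keywords_lower):
--             matching.append(market)
--
--     return matching
-- ===== SOURCE B (Python) =====
-- def _find_matching_markets(markets, keywords):
--     """Keyword-major pass: each keyword marks the indices of markets whose title
--     contains it; markets are then emitted in original order."""
--     matched = set()
--     for keyword in keywords:
--         kw = keyword.lower()
--         for i, market in enumerate(markets):
--             if kw in market.get("title", "").lower():
--                 matched.add(i)
--     return [market for i, market in enumerate(markets) if i in matched]
-- ===== Notes on version B (the rewrite author's own statement) =====
-- stated objective: alternative
-- what changed: Transposes the loops: instead of scanning keywords per market, B iterates keyword-major, collecting the set of matching market indices, and then emits markets in original order by index membership.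
import Mathlib
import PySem

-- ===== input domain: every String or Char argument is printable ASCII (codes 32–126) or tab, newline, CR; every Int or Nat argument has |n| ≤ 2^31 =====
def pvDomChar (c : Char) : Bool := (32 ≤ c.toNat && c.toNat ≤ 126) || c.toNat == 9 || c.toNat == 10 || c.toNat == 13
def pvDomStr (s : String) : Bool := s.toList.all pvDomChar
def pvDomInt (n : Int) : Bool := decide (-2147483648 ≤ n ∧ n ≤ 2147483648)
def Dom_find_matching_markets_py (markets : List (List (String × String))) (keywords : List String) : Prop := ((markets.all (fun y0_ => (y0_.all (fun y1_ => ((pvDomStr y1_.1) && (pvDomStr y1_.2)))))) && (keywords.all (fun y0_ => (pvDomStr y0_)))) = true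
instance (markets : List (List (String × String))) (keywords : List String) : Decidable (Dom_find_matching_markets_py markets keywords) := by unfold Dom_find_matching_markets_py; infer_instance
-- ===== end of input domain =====

-- B transposes the loops: keyword-major collection of matching market indices into a set, then emission in original order (alternative decomposition, same cost).


-- ===== PORT A =====
def find_matching_markets_py (markets : List (List (String × String))) (keywords : List String) : List (List (String × String)) :=
  -- matching = []; keywords_lower = [k.lower() for k in keywords]
  let keywords_lower := keywords.map PySem.Str.lower
  -- for market in markets: title_lower = market.get("title","").lower(); if any(kw in title_lower): matching.append(market)
  markets.foldl
    (fun matching market =>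
      let title_lower := PySem.Str.lower (PySem.Dict.getD (PySem.Dict.mk market) "title" "")
      if keywords_lower.any (fun keyword => PySem.Str.isIn keyword title_lower) then
        matching ++ [market]
      else matching)
    []

-- ===== PORT B =====
def find_matching_markets_py_alt (markets : List (List (String × String))) (keywords : List String) : List (List (String × String)) :=
  -- matched = set(); for keyword in keywords: kw = keyword.lower(); for i, market in enumerate(markets): if kw in title.lower(): matched.add(i)
  let matched : PySem.Set Int :=
    keywords.foldl
      (fun matched keyword =>
        let kw := PySem.Str.lower keyword
        (PySem.List.enumerate markets).foldl
          (fun matched p =>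
            if PySem.Str.isIn kw (PySem.Str.lower (PySem.Dict.getD (PySem.Dict.mk p.2) "title" "")) then
              PySem.Set.add matched p.1
            else matched)
          matched)
      PySem.Set.empty
  -- [market for i, market in enumerate(markets) if i in matched]
  ((PySem.List.enumerate markets).filter (fun p => PySem.Set.contains matched p.1)).map (fun p => p.2)

-- ===== PRECONDITION & SPEC =====
def Spec_find_matching_markets_py (markets : List (List (String × String))) (keywords : List String) (out : List (List (String × String))) : Prop := out = find_matching_markets_py_alt markets keywords
instance (markets : List (List (String × String))) (keywords : List String) (out : List (List (String × String))) : Decidable (Spec_find_matching_markets_py markets keywords out) := by unfold Spec_find_matching_markets_py; infer_instance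

-- ===== CLAIM (what is proved, stated in full; the proofs are below) =====
def Claim_equal_find_matching_markets_py : Prop := ∀ (markets : List (List (String × String))) (keywords : List String), Dom_find_matching_markets_py markets keywords → Spec_find_matching_markets_py markets keywords (find_matching_markets_py markets keywords)

-- ===== LEMMAS AND PROOFS =====

-- A's per-market test
def pvPredA (keywords : List String) (m : List (String × String)) : Bool :=
  (keywords.map PySem.Str.lower).any
    (fun keyword => PySem.Str.isIn keyword (PySem.Str.lower (PySem.Dict.getD (PySem.Dict.mk m) "title" "")))

-- inner fold over enumerate: membership characterization
theorem pv_mem_inner (markets : List (List (String × String))) (c : (Int × List (String × String)) → Bool)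
    (s : PySem.Set Int) (i : Int) :
    i ∈ (PySem.List.enumerate markets).foldl
          (fun matched p => if c p then PySem.Set.add matched p.1 else matched) s
      ↔ i ∈ s ∨ ∃ p ∈ PySem.List.enumerate markets, p.1 = i ∧ c p := by
  have H : ∀ (l : List (Int × List (String × String))) (s : PySem.Set Int),
      i ∈ l.foldl (fun matched p => if c p then PySem.Set.add matched p.1 else matched) s
        ↔ i ∈ s ∨ ∃ p ∈ l, p.1 = i ∧ c p := by
    intro l
    induction l with
    | nil => simp
    | cons hd tl ih =>
      intro s
      simp only [List.foldl_cons, ih, List.mem_cons]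
      by_cases h : c hd
      · simp only [h, if_pos, PySem.Set.mem_add]
        constructor
        · rintro (⟨hs | rfl⟩ | ⟨p, hp, rfl, hc⟩)
          · exact Or.inl hs
          · exact Or.inr ⟨hd, Or.inl rfl, rfl, h⟩
          · exact Or.inr ⟨p, Or.inr hp, rfl, hc⟩
        · rintro (hs | ⟨p, (rfl | hp), rfl, hc⟩)
          · exact Or.inl (Or.inl hs)
          · exact Or.inl (Or.inr rfl)
          · exact Or.inr ⟨p, hp, rfl, hc⟩
      · simp only [h, if_neg, Bool.false_eq_true, not_false_iff]
        constructor
        · rintro (hs | ⟨p, hp, rfl, hc⟩)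
          · exact Or.inl hs
          · exact Or.inr ⟨p, Or.inr hp, rfl, hc⟩
        · rintro (hs | ⟨p, (rfl | hp), rfl, hc⟩)
          · exact Or.inl hs
          · exact absurd hc (by simp [h])
          · exact Or.inr ⟨p, hp, rfl, hc⟩
  exact H _ s

-- outer fold: membership in matched ↔ some keyword matches markets[i]
theorem pv_mem_matched (markets : List (List (String × String))) (keywords : List String)
    (s : PySem.Set Int) (i : Int) :
    i ∈ keywords.foldl
          (fun matched keyword =>
            (PySem.List.enumerate markets).foldl
              (fun matched p =>
                if PySem.Str.isIn (PySem.Str.lower keyword)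
                    (PySem.Str.lower (PySem.Dict.getD (PySem.Dict.mk p.2) "title" "")) then
                  PySem.Set.add matched p.1
                else matched)
              matched) s
      ↔ i ∈ s ∨ ∃ keyword ∈ keywords, ∃ p ∈ PySem.List.enumerate markets, p.1 = i ∧
          PySem.Str.isIn (PySem.Str.lower keyword)
            (PySem.Str.lower (PySem.Dict.getD (PySem.Dict.mk p.2) "title" "")) := by
  induction keywords generalizing s with
  | nil => simp
  | cons k tl ih =>
    simp only [List.foldl_cons, ih, pv_mem_inner, List.mem_cons]
    constructor
    · rintro (⟨hs | ⟨p, hp, rfl, hc⟩⟩ | ⟨kw, hkw, p, hp, rfl, hc⟩)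
      · exact Or.inl hs
      · exact Or.inr ⟨k, Or.inl rfl, p, hp, rfl, hc⟩
      · exact Or.inr ⟨kw, Or.inr hkw, p, hp, rfl, hc⟩
    · rintro (hs | ⟨kw, (rfl | hkw), p, hp, rfl, hc⟩)
      · exact Or.inl (Or.inl hs)
      · exact Or.inl (Or.inr ⟨p, hp, rfl, hc⟩)
      · exact Or.inr ⟨kw, hkw, p, hp, rfl, hc⟩

theorem find_matching_markets_py_eq (markets : List (List (String × String))) (keywords : List String) :
    find_matching_markets_py markets keywords = find_matching_markets_py_alt markets keywords := by
  unfold find_matching_markets_py find_matching_markets_py_alt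
  rw [PySem.List.foldl_append_if_eq_filter]
  simp only [List.nil_append]
  have hmem : ∀ p ∈ PySem.List.enumerate markets,
      PySem.Set.contains
        (keywords.foldl
          (fun matched keyword =>
            (PySem.List.enumerate markets).foldl
              (fun matched q =>
                if PySem.Str.isIn (PySem.Str.lower keyword)
                    (PySem.Str.lower (PySem.Dict.getD (PySem.Dict.mk q.2) "title" "")) then
                  PySem.Set.add matched q.1
                else matched)
              matched) PySem.Set.empty) p.1 = pvPredA keywords p.2 := by
    intro p hp
    rw [Bool.eq_iff_iff]
    simp only [PySem.Set.contains, List.contains_iff_mem, pv_mem_matched, pvPredA,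
      List.any_eq_true, List.mem_map]
    constructor
    · rintro (hs | ⟨kw, hkw, q, hq, hq1, hc⟩)
      · simp [PySem.Set.empty] at hs
      · -- q and p are the same entry of enumerate (same first component)
        rw [PySem.List.mem_enumerate_iff] at hp hq
        obtain ⟨j, hj, rfl⟩ := hp
        obtain ⟨j', hj', rfl⟩ := hq
        simp only [zero_add] at hq1
        have : j' = j := by exact_mod_cast hq1
        subst this
        exact ⟨PySem.Str.lower kw, ⟨kw, hkw, rfl⟩, hc⟩
    · rintro ⟨_, ⟨kw, hkw, rfl⟩, hc⟩
      exact Or.inr ⟨kw, hkw, p, hp, rfl, hc⟩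
  rw [List.filter_congr hmem]
  have : (PySem.List.enumerate markets).filter (fun p => pvPredA keywords p.2)
      = (PySem.List.enumerate markets).filter ((fun m => pvPredA keywords m) ∘ (fun p => p.2)) := rfl
  rw [this, ← List.filter_map, PySem.List.map_snd_enumerate]
  rfl

-- ===== VERDICT (by name: the statement is the Claim_ definition above) =====
theorem find_matching_markets_py_spec : Claim_equal_find_matching_markets_py := by
  intro markets keywords _
  exact find_matching_markets_py_eq markets keywords
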